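-- pv_equiv track=rewrite | github.com/qoocrab/project-algorithm-programmers | level_0/KCH/20230923/배열만들기4.py | solution
-- ===== SOURCE A (Python) =====
-- def solution(arr):
--     stk = []
--     i = 0
--
--     while i<len(arr):
--         if not stk:
--             stk.append(arr[i])
--         elif stk[-1]<arr[i]:
--             stk.append(arr[i])
--         else:
--             stk.pop()
--             continue
--         i += 1
--
--     return stk
-- ===== SOURCE B (Python) =====
-- def solution(arr):
--     # Strict suffix minima: one right-to-left pass with a running minimum.
--     res = []
--     m = None
--     for x in reversed(arr):
--         if m is None or x < m:
--             res.append(x)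
--             m = x
--     return res[::-1]
-- ===== Notes on version B (the rewrite author's own statement) =====
-- stated objective: faster
-- what changed: Replaces the index/while monotonic stack with pop-and-retry by a single right-to-left pass keeping a running minimum (the result is exactly the strict suffix minima), reversed at the end.
import Mathlib
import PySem

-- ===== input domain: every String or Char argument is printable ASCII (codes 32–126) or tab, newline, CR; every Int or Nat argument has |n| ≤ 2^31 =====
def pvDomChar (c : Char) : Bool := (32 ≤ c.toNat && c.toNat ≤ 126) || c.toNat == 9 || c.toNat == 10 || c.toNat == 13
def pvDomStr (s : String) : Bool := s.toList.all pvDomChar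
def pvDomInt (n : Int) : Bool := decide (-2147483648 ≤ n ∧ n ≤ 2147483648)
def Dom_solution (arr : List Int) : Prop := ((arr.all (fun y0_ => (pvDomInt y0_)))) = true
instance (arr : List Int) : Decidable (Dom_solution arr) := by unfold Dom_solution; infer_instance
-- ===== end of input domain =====

-- B replaces A's while-loop monotonic stack (pop-and-retry without advancing i) by a
-- single right-to-left pass with a running minimum; return value only, A mutates nothing observable.

-- ===== PORT A =====
-- A's while loop over index i with stack stk; 'rest' plays the role of arr[i:],
-- the 'continue' branch pops (Python stk.pop() = drop last) and retries the same element.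
def solLoop (stk : List Int) (rest : List Int) : List Int :=
  match rest with
  | [] => stk
  | x :: xs =>
    match h : stk.getLast? with
    | none => solLoop (stk ++ [x]) xs                    -- if not stk: append
    | some t =>
      if t < x then solLoop (stk ++ [x]) xs              -- elif stk[-1] < arr[i]: append
      else solLoop stk.dropLast (x :: xs)                -- else: pop; continue
termination_by (rest.length, stk.length)
decreasing_by
  all_goals first
  | (simp [Prod.lex_def]; done)
  | (have hpos : 0 < stk.length := List.length_pos_of_ne_nil (by intro hn; simp [hn] at h)
     simp [Prod.lex_def, List.length_dropLast]
     omega)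

def solution (arr : List Int) : List Int := solLoop [] arr

-- ===== PORT B =====
def solution_alt (arr : List Int) : List Int :=
  let step : List Int × Option Int → Int → List Int × Option Int := fun st x =>
    match st.2 with
    | none => (st.1 ++ [x], some x)
    | some m => if x < m then (st.1 ++ [x], some x) else st
  (arr.reverse.foldl step ([], none)).1.reverse

-- ===== PRECONDITION & SPEC =====
def Spec_solution (arr : List Int) (out : List Int) : Prop := out = solution_alt arr
instance (arr : List Int) (out : List Int) : Decidable (Spec_solution arr out) := by unfold Spec_solution; infer_instance

-- ===== CLAIM (what is proved, stated in full; the proofs are below) =====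
def Claim_equal_solution : Prop := ∀ (arr : List Int), Dom_solution arr → Spec_solution arr (solution arr)

-- ===== LEMMAS AND PROOFS =====

-- the common specification: strict suffix minima
def sufmin : List Int → List Int
  | [] => []
  | x :: xs => if xs.all (fun y => x < y) then x :: sufmin xs else sufmin xs

def runMin : List Int → Option Int
  | [] => none
  | x :: xs => match runMin xs with
    | none => some x
    | some v => some (min x v)

theorem runMin_none {l : List Int} : runMin l = none ↔ l = [] := by
  cases l with
  | nil => simp [runMin]
  | cons x xs => simp [runMin]; cases runMin xs <;> simp

theorem all_lt_runMin (x : Int) (l : List Int) (v : Int) (h : runMin l = some v) :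
    (l.all (fun y => x < y) = true) ↔ x < v := by
  induction l generalizing v with
  | nil => simp [runMin] at h
  | cons a t ih =>
    simp only [runMin] at h
    cases ht : runMin t with
    | none =>
      have : t = [] := runMin_none.mp ht
      subst this
      simp [runMin] at h
      simp [h]
    | some w =>
      rw [ht] at h
      injection h with h
      subst h
      simp [List.all_cons, ih w ht]

theorem sufmin_reverse_foldB (l : List Int) :
    l.reverse.foldl (fun (st : List Int × Option Int) x =>
      match st.2 with
      | none => (st.1 ++ [x], some x)
      | some m => if x < m then (st.1 ++ [x], some x) else st) ([], none)
    = ((sufmin l).reverse, runMin l) := by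
  induction l with
  | nil => simp [sufmin, runMin]
  | cons x xs ih =>
    rw [List.reverse_cons, List.foldl_append, ih]
    cases h : runMin xs with
    | none =>
      have : xs = [] := runMin_none.mp h
      subst this
      simp [sufmin, runMin]
    | some v =>
      by_cases hx : x < v
      · have hall : xs.all (fun y => x < y) = true := (all_lt_runMin x xs v h).mpr hx
        simp [sufmin, hall, runMin, h, hx, min_eq_left (le_of_lt hx)]
      · have hall : xs.all (fun y => x < y) = false := by
          by_contra hc
          exact hx ((all_lt_runMin x xs v h).mp (by revert hc; cases xs.all (fun y => x < y) <;> simp))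
        simp [sufmin, hall, runMin, h, hx, min_eq_right (le_of_not_gt hx)]

theorem mem_lt_of_pairwise_getLast {l : List Int} {t a x : Int}
    (hp : l.Pairwise (· < ·)) (hl : l.getLast? = some t) (ht : t < x) (ha : a ∈ l) : a < x := by
  have hne : l ≠ [] := by intro hn; simp [hn] at hl
  have hd : l.dropLast ++ [l.getLast hne] = l := List.dropLast_append_getLast hne
  have htl : l.getLast hne = t := by
    have := List.getLast?_eq_some_getLast (l := l) hne
    rw [hl] at this; exact (Option.some_inj.mp this.symm)
  rw [← hd] at hp ha
  rcases List.mem_append.mp ha with h1 | h2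
  · have := (List.pairwise_append.mp hp).2.2 a h1 (l.getLast hne) (by simp)
    omega
  · simp at h2; omega

theorem solLoop_eq (stk rest : List Int) (hp : stk.Pairwise (· < ·)) :
    solLoop stk rest = stk.filter (fun a => rest.all (fun y => a < y)) ++ sufmin rest := by
  induction stk, rest using solLoop.induct with
  | case1 stk => simp [solLoop, sufmin, List.filter_eq_self.mpr]
  | case2 stk x xs h ih =>
    have hs : stk = [] := by
      cases stk with
      | nil => rfl
      | cons a t => simp at h
    subst hs
    rw [solLoop, h]
    simp only []
    rw [ih (by simp)]
    simp only [List.nil_append, List.filter_cons, List.filter_nil, sufmin]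
    cases hb : xs.all (fun y => x < y) <;> simp [hb]
  | case3 stk x xs t h hlt ih =>
    rw [solLoop, h]
    simp only [hlt, if_pos]
    have hp' : (stk ++ [x]).Pairwise (· < ·) := by
      rw [List.pairwise_append]
      exact ⟨hp, by simp, fun a ha b hb => by
        simp at hb; subst hb; exact mem_lt_of_pairwise_getLast hp h hlt ha⟩
    rw [ih hp']
    have hcong : stk.filter (fun a => ((x :: xs).all (fun y => a < y)))
        = stk.filter (fun a => xs.all (fun y => a < y)) := by
      apply List.filter_congr
      intro a ha
      have : a < x := mem_lt_of_pairwise_getLast hp h hlt ha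
      simp [List.all_cons, this]
    rw [hcong, List.filter_append]
    simp only [List.filter_cons, List.filter_nil, sufmin]
    cases hb : xs.all (fun y => x < y) <;> simp [hb]
  | case4 stk x xs t h hlt ih =>
    rw [solLoop, h]
    simp only [hlt, if_neg, if_false]
    have hne : stk ≠ [] := by intro hn; simp [hn] at h
    have hd : stk.dropLast ++ [stk.getLast hne] = stk := List.dropLast_append_getLast hne
    have htl : stk.getLast hne = t := by
      have := List.getLast?_eq_some_getLast (l := stk) hne
      rw [h] at this; exact (Option.some_inj.mp this.symm)
    have hp' : stk.dropLast.Pairwise (· < ·) := hp.sublist (List.dropLast_sublist stk)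
    rw [ih hp']
    congr 1
    conv_rhs => rw [← hd]
    rw [List.filter_append, htl]
    simp [List.filter_cons, List.all_cons, hlt]

theorem solution_eq_sufmin (arr : List Int) : solution arr = sufmin arr := by
  rw [solution, solLoop_eq [] arr (by simp)]
  simp

theorem solution_alt_eq_sufmin (arr : List Int) : solution_alt arr = sufmin arr := by
  rw [solution_alt]
  simp only [sufmin_reverse_foldB, List.reverse_reverse]

-- ===== VERDICT (by name: the statement is the Claim_ definition above) =====
theorem solution_spec : Claim_equal_solution := by
  intro arr _
  unfold Spec_solution
  rw [solution_eq_sufmin, solution_alt_eq_sufmin]
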